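-- pv_equiv track=rewrite | github.com/jayesh-bansal/20-Days-Placement-Training | counting using recursion.py | find_by_frequency
-- ===== SOURCE A (Python) =====
-- def find_frequency(d,target,l,i):
--     if d[l[i]] == target: # frequency = target
--         return l[i] # return key
--     return find_frequency(d,target,l,i+1) # increment the index
--
-- def find_by_frequency(l,i,target,d):
--     if i == len(l): # reached the end of the array
--         return find_frequency(d,target,list(d.keys()),0) # check the frequency with target
--     if l[i] in d: # creating an dict for frequency
--         d[l[i]] += 1
--     else:
--         d[l[i]] = 1
--     return find_by_frequency(l,i+1,target,d) # incrementing the count to reach the end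
-- ===== SOURCE B (Python) =====
-- # B: iterative re-implementation — count l[i:] into the same dict d with a for-loop,
-- # then scan d's items in insertion order for the first value equal to target.
-- # Like A, it mutates the caller's d in place.
-- def find_by_frequency(l, i, target, d):
--     for j in range(i, len(l)):
--         d[l[j]] = d.get(l[j], 0) + 1
--     for k, v in d.items():
--         if v == target:
--             return k
--     return None  # A raises IndexError here (no key has the target frequency)
-- ===== Notes on version B (the rewrite author's own statement) =====
-- stated objective: simpler
-- what changed: replaces A's double recursion (recursive counting pass plus an index-walking recursive key scan) with two plain loops: a for-loop counting l[i:] into d via d.get, then a first-match scan of d.items(); Pre_ excludes the inputs where A raises (index out of range, or no key with the target frequency) and association lists with duplicate keys, which do not denote a Python dict.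
import Mathlib
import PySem

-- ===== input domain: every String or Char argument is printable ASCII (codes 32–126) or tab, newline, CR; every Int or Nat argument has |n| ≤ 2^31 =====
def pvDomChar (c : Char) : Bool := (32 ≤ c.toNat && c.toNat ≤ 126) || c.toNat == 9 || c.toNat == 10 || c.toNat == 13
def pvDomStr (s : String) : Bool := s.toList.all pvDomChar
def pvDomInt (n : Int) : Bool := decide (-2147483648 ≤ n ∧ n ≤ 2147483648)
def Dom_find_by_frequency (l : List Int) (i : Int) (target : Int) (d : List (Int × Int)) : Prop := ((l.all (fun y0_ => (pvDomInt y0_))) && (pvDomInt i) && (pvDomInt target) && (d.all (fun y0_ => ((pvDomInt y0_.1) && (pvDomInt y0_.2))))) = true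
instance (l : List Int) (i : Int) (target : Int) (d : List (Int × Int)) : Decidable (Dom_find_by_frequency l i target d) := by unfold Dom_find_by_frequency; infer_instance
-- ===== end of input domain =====

-- B replaces A's double recursion with two plain loops (same return value and the same
-- in-place mutation of d; equivalence proved for the return value on Pre_).

-- ===== PORT A =====
-- find_frequency(d, target, l, i): walks l (a key list) by index from i; l[i] raises
-- IndexError when the index runs off the end — the port returns the junk value 0 there
-- (excluded by Pre_find_by_frequency).
def find_frequency (d : PySem.Dict Int Int) (target : Int) (l : List Int) (i : Int) : Int :=
  match h : PySem.List.pyGet? l i with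
  | none => 0  -- IndexError
  | some k =>
    if d.getD k 0 = target then k
    else find_frequency d target l (i + 1)
termination_by ((l.length : Int) - i).toNat
decreasing_by
  have hin : PySem.Raise.InRange l.length i := by
    by_contra hc
    rw [← PySem.List.pyGet?_eq_none_iff] at hc
    simp [hc] at h
  rcases hin with ⟨_, hlt⟩
  omega

-- the recursive counting pass of find_by_frequency (same parameters, d as a dict)
def find_by_frequency_rec (l : List Int) (i : Int) (target : Int) (d : PySem.Dict Int Int) : Int :=
  if i = (l.length : Int) then
    find_frequency d target d.keys 0
  else
    match h : PySem.List.pyGet? l i with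
    | none => 0  -- IndexError on l[i] (excluded by Pre_find_by_frequency)
    | some x =>
      let d' := if d.contains x then d.modify x 0 (· + 1) else d.insert x 1
      find_by_frequency_rec l (i + 1) target d'
termination_by ((l.length : Int) - i).toNat
decreasing_by
  have hin : PySem.Raise.InRange l.length i := by
    by_contra hc
    rw [← PySem.List.pyGet?_eq_none_iff] at hc
    simp [hc] at h
  rcases hin with ⟨_, hlt⟩
  omega

def find_by_frequency (l : List Int) (i : Int) (target : Int) (d : List (Int × Int)) : Int :=
  find_by_frequency_rec l i target (PySem.Dict.mk d)

-- ===== PORT B =====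
-- the second loop of B: first (k, v) of d.items() with v == target; B returns None when
-- the loop falls through — junk value 0 here, excluded by Pre_find_by_frequency.
def scan_items (items : List (Int × Int)) (target : Int) : Int :=
  match items with
  | [] => 0
  | (k, v) :: rest => if v = target then k else scan_items rest target

-- the first loop of B: for j in range(i, len(l)): d[l[j]] = d.get(l[j], 0) + 1
-- (Option state: none = IndexError on l[j], excluded by Pre_find_by_frequency)
def find_by_frequency_alt (l : List Int) (i : Int) (target : Int) (d : List (Int × Int)) : Int :=
  match (PySem.List.pyRange i (l.length : Int) 1).foldl
      (fun st j => st.bind fun dd =>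
        (PySem.List.pyGet? l j).map fun x => dd.insert x (dd.getD x 0 + 1))
      (some (PySem.Dict.mk d)) with
  | none => 0
  | some d' => scan_items d'.items target

-- ===== PRECONDITION & SPEC =====
-- Pre_ = exactly the inputs where Python A returns: the start index is in range (else
-- l[i] raises IndexError) and, after counting l[i:] on top of d, some key of the final
-- dict has frequency = target (else find_frequency runs off the key list and raises
-- IndexError).  It also requires d's keys to be distinct: an association list with a
-- repeated key does not denote a Python dict, so A's behaviour on it is nobody's.
def Pre_find_by_frequency (l : List Int) (i : Int) (target : Int) (d : List (Int × Int)) : Prop :=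
  -(l.length : Int) ≤ i ∧ i ≤ (l.length : Int) ∧ (d.map Prod.fst).Nodup ∧
  ∃ k ∈ d.map Prod.fst ++ (if i < 0 then l else l.drop i.toNat),
    (PySem.Dict.mk d).getD k 0 +
      (if i < 0 then ((l.count k : Int) + ((l.drop (l.length + i).toNat).count k : Int))
       else ((l.drop i.toNat).count k : Int)) = target

instance (l : List Int) (i : Int) (target : Int) (d : List (Int × Int)) : Decidable (Pre_find_by_frequency l i target d) := by unfold Pre_find_by_frequency; infer_instance

def pvWitness_find_by_frequency : List Int × Int × Int × (List (Int × Int)) :=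
  ([1, 2, 2, 3], 0, 2, [(7, 0)])

def Spec_find_by_frequency (l : List Int) (i : Int) (target : Int) (d : List (Int × Int)) (out : Int) : Prop := out = find_by_frequency_alt l i target d
instance (l : List Int) (i : Int) (target : Int) (d : List (Int × Int)) (out : Int) : Decidable (Spec_find_by_frequency l i target d out) := by unfold Spec_find_by_frequency; infer_instance

-- ===== CLAIM (what is proved, stated in full; the proofs are below) =====
def Claim_equal_find_by_frequency : Prop := ∀ (l : List Int) (i : Int) (target : Int) (d : List (Int × Int)), Dom_find_by_frequency l i target d → Pre_find_by_frequency l i target d → Spec_find_by_frequency l i target d (find_by_frequency l i target d)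

-- ===== LEMMAS AND PROOFS =====

-- non-dependent unfolding equation for find_frequency
lemma ff_unfold (dd : PySem.Dict Int Int) (target : Int) (l : List Int) (i : Int) :
    find_frequency dd target l i = match PySem.List.pyGet? l i with
      | none => 0
      | some k => if dd.getD k 0 = target then k else find_frequency dd target l (i + 1) := by
  rw [find_frequency]
  cases hk : PySem.List.pyGet? l i <;> simp

-- non-dependent unfolding equation for the counting recursion
lemma rec_unfold (l : List Int) (i : Int) (target : Int) (dd : PySem.Dict Int Int) :
    find_by_frequency_rec l i target dd =
      if i = (l.length : Int) then find_frequency dd target dd.keys 0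
      else match PySem.List.pyGet? l i with
        | none => 0
        | some x =>
          find_by_frequency_rec l (i + 1) target
            (if dd.contains x then dd.modify x 0 (· + 1) else dd.insert x 1) := by
  rw [find_by_frequency_rec]
  by_cases hi : i = (l.length : Int)
  · simp [hi]
  · simp only [if_neg hi]
    cases hk : PySem.List.pyGet? l i <;> simp

-- A's per-element dict update equals B's unconditional insert
lemma update_eq (dd : PySem.Dict Int Int) (x : Int) :
    (if dd.contains x then dd.modify x 0 (· + 1) else dd.insert x 1)
      = dd.insert x (dd.getD x 0 + 1) := by
  by_cases h : dd.contains x = true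
  · rw [if_pos h]; rfl
  · have hf : dd.contains x = false := by simpa using h
    have h0 : dd.getD x 0 = 0 := PySem.Dict.getD_of_not_contains dd 0 hf
    rw [if_neg (by simp [hf]), h0]
    norm_num

-- the step function of B's counting fold never leaves the none state
lemma fold_none (l : List Int) (js : List Int) :
    js.foldl
      (fun (st : Option (PySem.Dict Int Int)) j => st.bind fun dd =>
        (PySem.List.pyGet? l j).map fun x => PySem.Dict.insert dd x (dd.getD x 0 + 1))
      none = none := by
  induction js with
  | nil => rfl
  | cons j js ih => simpa using ih

-- index-shift: A's index walk of a cons key list from n+1 is the walk of the tail from n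
lemma ff_shift (dd : PySem.Dict Int Int) (target : Int) :
    ∀ (m : Nat) (ks : List Int) (k : Int) (n : Nat), ks.length - n ≤ m →
      find_frequency dd target (k :: ks) ((n : Int) + 1) = find_frequency dd target ks (n : Int) := by
  intro m
  induction m with
  | zero =>
    intro ks k n hm
    have h1 : PySem.List.pyGet? (k :: ks) ((n : Int) + 1) = none := by
      rw [PySem.List.pyGet?_eq_none_iff]
      intro hin
      rcases hin with ⟨_, hlt⟩
      simp only [List.length_cons] at hlt
      omega
    have h2 : PySem.List.pyGet? ks (n : Int) = none := by
      rw [PySem.List.pyGet?_eq_none_iff]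
      intro hin
      rcases hin with ⟨_, hlt⟩
      omega
    conv_lhs => rw [ff_unfold]
    conv_rhs => rw [ff_unfold]
    rw [h1, h2]
  | succ m ih =>
    intro ks k n hm
    conv_lhs => rw [ff_unfold]
    conv_rhs => rw [ff_unfold]
    rw [PySem.List.pyGet?_cons_succ]
    cases hk : PySem.List.pyGet? ks (n : Int) with
    | none => rfl
    | some x =>
      have hlt : (n : Int) < ks.length := by
        have hin : PySem.Raise.InRange ks.length (n : Int) := by
          by_contra hc
          rw [← PySem.List.pyGet?_eq_none_iff] at hc
          simp [hc] at hk
        exact hin.2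
      simp only
      by_cases ht : dd.getD x 0 = target
      · simp only [if_pos ht]
      · simp only [if_neg ht]
        have hcast : (n : Int) + 1 = ((n + 1 : Nat) : Int) := by push_cast; ring
        rw [hcast]
        exact ih ks k (n + 1) (by omega)

-- A's key walk from index 0 is B's structural scan of the items
lemma walk_eq_scan (dd : PySem.Dict Int Int) (target : Int) :
    ∀ (its : List (Int × Int)), (∀ k v, (k, v) ∈ its → dd.getD k 0 = v) →
      find_frequency dd target (its.map Prod.fst) 0 = scan_items its target := by
  intro its
  induction its with
  | nil =>
    intro _
    rw [ff_unfold]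
    simp [PySem.List.pyGet?, PySem.List.pyIdx?, scan_items]
  | cons p rest ih =>
    intro hval
    obtain ⟨k, v⟩ := p
    have hkv : dd.getD k 0 = v := hval k v List.mem_cons_self
    rw [ff_unfold]
    have h0 : PySem.List.pyGet? (((k, v) :: rest).map Prod.fst) 0 = some k :=
      PySem.List.pyGet?_zero_cons k (rest.map Prod.fst)
    rw [List.map_cons] at h0 ⊢
    rw [h0]
    simp only [scan_items, hkv]
    by_cases ht : v = target
    · simp only [if_pos ht]
    · simp only [if_neg ht]
      have hshift : find_frequency dd target (k :: rest.map Prod.fst) ((0 : Nat) + 1)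
          = find_frequency dd target (rest.map Prod.fst) ((0 : Nat) : Int) :=
        ff_shift dd target (rest.map Prod.fst).length (rest.map Prod.fst) k 0 (by omega)
      simp only [Nat.cast_zero, zero_add] at hshift
      simp only [zero_add]
      rw [hshift]
      exact ih (fun k' v' hm => hval k' v' (List.mem_cons_of_mem _ hm))

-- the items scan seen through A's eyes
lemma ff_eq_scan (dd : PySem.Dict Int Int) (target : Int) (hnd : dd.keys.Nodup) :
    find_frequency dd target dd.keys 0 = scan_items dd.items target := by
  have hkeys : dd.keys = dd.items.map Prod.fst := rfl
  rw [hkeys]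
  exact walk_eq_scan dd target dd.items
    (fun k v hm => PySem.Dict.getD_of_mem_items dd hm hnd 0)

-- the main induction: the counting recursion equals the fold-then-scan form
lemma main_eq (l : List Int) (target : Int) :
    ∀ (m : Nat) (i : Int) (dd : PySem.Dict Int Int),
      ((l.length : Int) - i).toNat ≤ m → i ≤ (l.length : Int) → dd.keys.Nodup →
      find_by_frequency_rec l i target dd =
        (match (PySem.List.pyRange i (l.length : Int) 1).foldl
            (fun st j => st.bind fun dd =>
              (PySem.List.pyGet? l j).map fun x => PySem.Dict.insert dd x (dd.getD x 0 + 1))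
            (some dd) with
          | none => 0
          | some d' => scan_items d'.items target) := by
  intro m
  induction m with
  | zero =>
    intro i dd hm hle hnd
    have hi : i = (l.length : Int) := by omega
    subst hi
    have hr : PySem.List.pyRange (l.length : Int) (l.length : Int) 1 = [] := by
      simp
    rw [hr]
    simp only [List.foldl_nil]
    rw [rec_unfold, if_pos rfl]
    exact ff_eq_scan dd target hnd
  | succ m ih =>
    intro i dd hm hle hnd
    by_cases hi : i = (l.length : Int)
    · subst hi
      have hr : PySem.List.pyRange (l.length : Int) (l.length : Int) 1 = [] := by
        simp

      rw [hr]
      simp only [List.foldl_nil]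
      rw [rec_unfold, if_pos rfl]
      exact ff_eq_scan dd target hnd
    · have hlt : i < (l.length : Int) := lt_of_le_of_ne hle hi
      have hLHS : find_by_frequency_rec l i target dd =
          (match PySem.List.pyGet? l i with
            | none => 0
            | some x => find_by_frequency_rec l (i + 1) target (dd.insert x (dd.getD x 0 + 1))) := by
        rw [rec_unfold, if_neg hi]
        cases hx : PySem.List.pyGet? l i with
        | none => rfl
        | some x =>
          simp only
          rw [update_eq]
      rw [hLHS, PySem.List.pyRange_one_cons hlt]
      cases hx : PySem.List.pyGet? l i with
      | none =>
        have hstep : ((some dd).bind fun dd =>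
            (PySem.List.pyGet? l i).map fun x => PySem.Dict.insert dd x (dd.getD x 0 + 1))
            = none := by simp [hx]
        rw [List.foldl_cons, hstep]
        simp [fold_none]
      | some x =>
        have hstep : ((some dd).bind fun dd =>
            (PySem.List.pyGet? l i).map fun x => PySem.Dict.insert dd x (dd.getD x 0 + 1))
            = some (dd.insert x (dd.getD x 0 + 1)) := by simp [hx]
        rw [List.foldl_cons, hstep]
        exact ih (i + 1) (dd.insert x (dd.getD x 0 + 1)) (by omega) (by omega)
          (PySem.Dict.nodup_keys_insert dd x (dd.getD x 0 + 1) hnd)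

-- ===== VERDICT (by name: the statement is the Claim_ definition above) =====
theorem find_by_frequency_spec : Claim_equal_find_by_frequency := by
  intro l i target d _hdom hpre
  obtain ⟨h1, h2, hnd, -⟩ := hpre
  unfold Spec_find_by_frequency find_by_frequency find_by_frequency_alt
  exact main_eq l target ((l.length : Int) - i).toNat i (PySem.Dict.mk d) le_rfl h2 (by simpa using hnd)
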